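-- pv_equiv track=rewrite | github.com/Thejana-A/IS-4101-git | python_code/circuit_workflow.py | meeting_mode_solver
-- ===== SOURCE A (Python) =====
-- def meeting_mode_solver(earliest_time_slot):
--     earliest_time_slot = earliest_time_slot # Create a local dictionaty variable to assign values passed as parameter
--     meeting_mode = ""
--
--     are_all_values_one = all(value == 1 for value in earliest_time_slot['participants'].values()) # Check if all values are 1
--     count_ones = sum(1 for value in earliest_time_slot['participants'].values() if value == 1)
--     at_least_two_values_are_one = (count_ones >= 2) # Check if there are at least 2 values that are 1
--
--     if are_all_values_one:
--         meeting_mode = "onsite"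
--     elif at_least_two_values_are_one:
--         meeting_mode = "hybrid"
--     else:
--         meeting_mode = "online"
--
--     return meeting_mode, earliest_time_slot
-- ===== SOURCE B (Python) =====
-- def meeting_mode_solver(earliest_time_slot):
--     # Early-exit state machine: one flag for "some value != 1" and a ones
--     # counter capped at 2; as soon as the state proves "hybrid" we return.
--     saw_non_one = False
--     ones = 0  # capped at 2
--     for value in earliest_time_slot['participants'].values():
--         if value == 1:
--             if ones < 2:
--                 ones += 1
--         else:
--             saw_non_one = True
--         if saw_non_one and ones == 2:
--             return "hybrid", earliest_time_slot
--     return ("onsite" if not saw_non_one else "online"), earliest_time_slot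
-- ===== Notes on version B (the rewrite author's own statement) =====
-- stated objective: alternative
-- what changed: Replaces A's two full scans (all(...) and a count compared to 2) with an early-exit finite-state machine: a saw_non_one flag plus a ones counter capped at 2, returning 'hybrid' mid-loop as soon as the state decides it; no full count is ever formed.
import Mathlib
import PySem

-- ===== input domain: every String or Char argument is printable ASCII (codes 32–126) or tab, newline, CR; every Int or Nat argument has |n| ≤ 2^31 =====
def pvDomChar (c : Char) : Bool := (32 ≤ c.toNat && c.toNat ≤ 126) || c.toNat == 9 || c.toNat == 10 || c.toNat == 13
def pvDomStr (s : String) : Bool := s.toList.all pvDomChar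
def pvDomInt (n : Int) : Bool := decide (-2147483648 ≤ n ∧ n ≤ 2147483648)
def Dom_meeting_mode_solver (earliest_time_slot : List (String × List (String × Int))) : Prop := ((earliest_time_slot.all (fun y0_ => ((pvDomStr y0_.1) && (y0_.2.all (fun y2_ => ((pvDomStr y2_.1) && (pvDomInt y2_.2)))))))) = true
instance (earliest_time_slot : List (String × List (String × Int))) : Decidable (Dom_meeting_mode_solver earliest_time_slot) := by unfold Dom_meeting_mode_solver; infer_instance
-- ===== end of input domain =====

-- B replaces A's two full scans with an early-exit state machine (a saw_non_one flag and a
-- ones counter capped at 2) that can return "hybrid" mid-scan; return value unchanged.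

-- ===== PORT A =====
def meeting_mode_solver (earliest_time_slot : List (String × List (String × Int))) : String × (List (String × List (String × Int))) :=
  match (PySem.Dict.mk earliest_time_slot).get? "participants" with
  | none => ("", earliest_time_slot)   -- unreachable under Pre_ (Python raises KeyError here)
  | some participants =>
    let vals := (PySem.Dict.mk participants).values
    let are_all_values_one := vals.all (fun value => value == 1)
    let count_ones := vals.foldl (fun acc value => if value == 1 then acc + 1 else acc) (0 : Int)
    let at_least_two_values_are_one := count_ones ≥ 2
    let meeting_mode :=
      if are_all_values_one then "onsite"
      else if at_least_two_values_are_one then "hybrid"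
      else "online"
    (meeting_mode, earliest_time_slot)

-- ===== PORT B =====
-- B's loop with the early return: recursion over the value list carrying (saw_non_one, ones).
def mmLoop (vs : List Int) (saw_non_one : Bool) (ones : Int) : String :=
  match vs with
  | [] => if !saw_non_one then "onsite" else "online"
  | value :: rest =>
    let ones' := if value == 1 then (if ones < 2 then ones + 1 else ones) else ones
    let saw' := if value == 1 then saw_non_one else true
    if saw' && ones' == 2 then "hybrid" else mmLoop rest saw' ones'

def meeting_mode_solver_alt (earliest_time_slot : List (String × List (String × Int))) : String × (List (String × List (String × Int))) :=
  match (PySem.Dict.mk earliest_time_slot).get? "participants" with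
  | none => ("", earliest_time_slot)   -- unreachable under Pre_ (Python raises KeyError here)
  | some participants =>
    (mmLoop ((PySem.Dict.mk participants).values) false 0, earliest_time_slot)

-- ===== PRECONDITION & SPEC =====
-- Pre_ excludes exactly the inputs without a "participants" key, where Python A raises KeyError.
def Pre_meeting_mode_solver (earliest_time_slot : List (String × List (String × Int))) : Prop :=
  earliest_time_slot.any (fun kv => kv.1 == "participants") = true
instance (earliest_time_slot : List (String × List (String × Int))) : Decidable (Pre_meeting_mode_solver earliest_time_slot) := by unfold Pre_meeting_mode_solver; infer_instance
def pvWitness_meeting_mode_solver : (List (String × List (String × Int))) := [("participants", [("alice", 1), ("bob", 0)])]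

def Spec_meeting_mode_solver (earliest_time_slot : List (String × List (String × Int))) (out : String × (List (String × List (String × Int)))) : Prop := out = meeting_mode_solver_alt earliest_time_slot
instance (earliest_time_slot : List (String × List (String × Int))) (out : String × (List (String × List (String × Int)))) : Decidable (Spec_meeting_mode_solver earliest_time_slot out) := by unfold Spec_meeting_mode_solver; infer_instance

-- ===== CLAIM (what is proved, stated in full; the proofs are below) =====
def Claim_equal_meeting_mode_solver : Prop := ∀ (earliest_time_slot : List (String × List (String × Int))), Dom_meeting_mode_solver earliest_time_slot → Pre_meeting_mode_solver earliest_time_slot → Spec_meeting_mode_solver earliest_time_slot (meeting_mode_solver earliest_time_slot)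

-- ===== LEMMAS AND PROOFS =====

-- A's counting fold shifted by an arbitrary accumulator.
theorem countFold_shift (vs : List Int) (c : Int) :
    vs.foldl (fun acc value => if value == 1 then acc + 1 else acc) c
      = c + vs.foldl (fun acc value => if value == 1 then acc + 1 else acc) 0 := by
  induction vs generalizing c with
  | nil => simp
  | cons v vs ih =>
    simp only [List.foldl_cons]
    rw [ih, ih (if v == 1 then 0 + 1 else 0)]
    split <;> ring

theorem countFold_nonneg (vs : List Int) :
    (0 : Int) ≤ vs.foldl (fun acc value => if value == 1 then acc + 1 else acc) (0 : Int) := by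
  induction vs with
  | nil => simp
  | cons v vs ih =>
    simp only [List.foldl_cons]
    rw [countFold_shift vs (if v == 1 then 0 + 1 else 0)]
    split <;> omega

-- Characterisation of B's state machine: with a legal state, it returns exactly A's
-- classification (onsite iff no non-one was seen, hybrid iff the ones total reaches 2).
theorem mmLoop_eq (vs : List Int) (s : Bool) (o : Int)
    (h0 : 0 ≤ o) (h2 : o ≤ 2) (hns : ¬ (s = true ∧ o = 2)) :
    mmLoop vs s o =
      if s = false ∧ vs.all (fun value => value == 1) = true then "onsite"
      else if 2 ≤ o + vs.foldl (fun acc value => if value == 1 then acc + 1 else acc) (0 : Int) then "hybrid"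
      else "online" := by
  induction vs generalizing s o with
  | nil =>
    simp only [mmLoop, List.all_nil, List.foldl_nil, and_true]
    cases s with
    | false => simp
    | true =>
      have : o ≠ 2 := fun h => hns ⟨rfl, h⟩
      simp only [Bool.not_true]
      rw [if_neg (by simp), if_neg (by simp), if_neg (by omega)]
  | cons v vs ih =>
    have hcnt := countFold_nonneg vs
    simp only [mmLoop, List.all_cons, Bool.and_eq_true, List.foldl_cons,
      countFold_shift vs (if v == 1 then 0 + 1 else 0)]
    by_cases hv : (v == 1) = true
    · -- v == 1
      simp only [if_pos hv]
      by_cases ho : o < 2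
      · simp only [if_pos ho]
        by_cases hg : s = true ∧ ((o + 1 : Int) == 2) = true
        · rw [if_pos hg]
          have ho1 : (o + 1 : Int) = 2 := by have := hg.2; simpa using this
          rw [if_neg (show ¬ (s = false ∧ ((v == 1) = true ∧
                (vs.all (fun value => value == 1)) = true)) from
            fun hc => by rw [hg.1] at hc; exact absurd hc.1 (by simp))]
          rw [if_pos (by omega)]
        · rw [if_neg hg]
          rw [ih s (o + 1) (by omega) (by omega) (by
            rintro ⟨hs, ho2⟩
            exact hg ⟨hs, by rw [beq_iff_eq]; exact ho2⟩)]
          by_cases hall : vs.all (fun value => value == 1) = true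
          · by_cases hs : s = false
            · rw [if_pos (show s = false ∧ (vs.all (fun value => value == 1)) = true from ⟨hs, hall⟩),
                  if_pos (show s = false ∧ ((v == 1) = true ∧
                    (vs.all (fun value => value == 1)) = true) from ⟨hs, hv, hall⟩)]
            · rw [if_neg (show ¬ (s = false ∧ (vs.all (fun value => value == 1)) = true) from
                    fun hc => hs hc.1),
                  if_neg (show ¬ (s = false ∧ ((v == 1) = true ∧
                    (vs.all (fun value => value == 1)) = true)) from fun hc => hs hc.1)]
              congr 1
              exact propext ⟨fun h => by omega, fun h => by omega⟩
          · rw [if_neg (show ¬ (s = false ∧ (vs.all (fun value => value == 1)) = true) from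
                  fun hc => hall hc.2),
                if_neg (show ¬ (s = false ∧ ((v == 1) = true ∧
                  (vs.all (fun value => value == 1)) = true)) from fun hc => hall hc.2.2)]
            congr 1
            exact propext ⟨fun h => by omega, fun h => by omega⟩
      · -- o = 2, so s = false by hns
        simp only [if_neg ho]
        have ho2 : o = 2 := by omega
        have hs : s = false := by
          cases s with
          | false => rfl
          | true => exact absurd ⟨rfl, ho2⟩ hns
        subst hs
        rw [if_neg (show ¬ ((false : Bool) = true ∧ ((o : Int) == 2) = true) from
          fun hc => by simpa using hc.1)]
        rw [ih false o h0 h2 (by rintro ⟨h, _⟩; simp at h)]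
        by_cases hall : vs.all (fun value => value == 1) = true
        · rw [if_pos (show (false : Bool) = false ∧ (vs.all (fun value => value == 1)) = true from
                ⟨rfl, hall⟩),
              if_pos (show (false : Bool) = false ∧ ((v == 1) = true ∧
                (vs.all (fun value => value == 1)) = true) from ⟨rfl, hv, hall⟩)]
        · rw [if_neg (show ¬ ((false : Bool) = false ∧ (vs.all (fun value => value == 1)) = true) from
                fun hc => hall hc.2),
              if_neg (show ¬ ((false : Bool) = false ∧ ((v == 1) = true ∧
                (vs.all (fun value => value == 1)) = true)) from fun hc => hall hc.2.2)]
          rw [if_pos (by omega), if_pos (by omega)]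
    · -- v != 1: saw_non_one becomes true
      simp only [if_neg hv]
      rw [if_neg (show ¬ (s = false ∧ ((v == 1) = true ∧
            (vs.all (fun value => value == 1)) = true)) from fun hc => hv hc.2.1)]
      by_cases ho : ((o : Int) == 2) = true
      · rw [if_pos (show True ∧ ((o : Int) == 2) = true from ⟨trivial, ho⟩)]
        have ho2 : o = 2 := by simpa using ho
        rw [if_pos (by omega)]
      · rw [if_neg (show ¬ (True ∧ ((o : Int) == 2) = true) from fun hc => ho hc.2)]
        have ho2 : o ≠ 2 := by simpa using ho
        rw [ih true o h0 h2 (by rintro ⟨_, h⟩; exact ho2 h)]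
        rw [if_neg (show ¬ ((true : Bool) = false ∧ (vs.all (fun value => value == 1)) = true) from
          fun hc => by simpa using hc.1)]
        congr 1
        exact propext ⟨fun h => by omega, fun h => by omega⟩

-- Pre_ guarantees the "participants" lookup succeeds.
theorem get?_isSome_of_any (e : List (String × List (String × Int)))
    (hp : e.any (fun kv => kv.1 == "participants") = true) :
    (PySem.Dict.mk e).get? "participants" ≠ none := by
  induction e with
  | nil => simp at hp
  | cons kv rest ih =>
    simp only [List.any_cons, Bool.or_eq_true] at hp
    rw [PySem.Dict.get?_mk_cons]
    rcases hp with hp | hp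
    · simp [hp]
    · split
      · simp
      · exact ih hp

-- ===== VERDICT (by name: the statement is the Claim_ definition above) =====
theorem meeting_mode_solver_spec : Claim_equal_meeting_mode_solver := by
  intro e _ hpre
  unfold Spec_meeting_mode_solver meeting_mode_solver meeting_mode_solver_alt
  cases h : (PySem.Dict.mk e).get? "participants" with
  | none => exact absurd h (get?_isSome_of_any e hpre)
  | some ps =>
    simp only
    rw [mmLoop_eq _ false 0 (by omega) (by omega) (by rintro ⟨h, _⟩; exact Bool.false_ne_true h)]
    simp only [Int.zero_add, true_and]
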